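-- pv_equiv track=rewrite | github.com/0xp-g/dsa | 4084-maximize-sum-of-squares-of-digits/4084-maximize-sum-of-squares-of-digits.py | maxSumOfSquares
-- ===== SOURCE A (Python) =====
-- def maxSumOfSquares(num: int, sum: int) -> str:
--     if sum > 9*num:
--         return ''
--     res = ''
--     rsum = sum
--     for _ in range(num):
--         if rsum >= 9:
--             res += '9'
--             rsum -= 9
--         elif 0 < rsum < 9:
--             res += str(rsum)
--             rsum -= rsum
--         else:
--             res += '0'
--     return res
-- ===== SOURCE B (Python) =====
-- def maxSumOfSquares(num: int, sum: int) -> str: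
--     if sum > 9 * num:
--         return ''
--     s = max(sum, 0)
--     q = s // 9
--     r = s % 9
--     return '9' * q + (str(r) if r else '') + '0' * (num - q - (1 if r else 0))
-- ===== Notes on version B (the rewrite author's own statement) =====
-- stated objective: faster
-- what changed: Replaces the per-position greedy loop with a closed form: counts of '9', middle digit and '0' padding are computed arithmetically from sum//9 and sum%9 and the string is built from three repeated-character segments.
import Mathlib
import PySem

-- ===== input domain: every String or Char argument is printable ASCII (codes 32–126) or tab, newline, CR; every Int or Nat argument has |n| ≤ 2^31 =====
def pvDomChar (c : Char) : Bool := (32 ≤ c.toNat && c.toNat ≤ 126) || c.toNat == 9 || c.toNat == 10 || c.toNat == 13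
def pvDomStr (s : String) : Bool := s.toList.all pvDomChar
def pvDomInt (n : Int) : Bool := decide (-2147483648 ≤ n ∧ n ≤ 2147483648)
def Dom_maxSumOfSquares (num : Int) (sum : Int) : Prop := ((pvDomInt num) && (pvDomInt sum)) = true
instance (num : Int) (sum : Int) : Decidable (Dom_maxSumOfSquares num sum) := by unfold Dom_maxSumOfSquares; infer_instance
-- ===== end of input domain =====

-- B replaces A's per-position greedy loop by a closed-form three-segment construction ('9'*q + middle digit + '0' padding); faster by a constant factor (no per-digit branching/appends).

-- ===== PORT A =====
-- A's for-loop over range(num): num.toNat iterations; res is the string accumulator (List Char, wrapped into String at the end).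
def pvLoopA : Nat → Int → List Char → List Char
  | 0, _, res => res
  | n+1, rsum, res =>
    if rsum ≥ 9 then pvLoopA n (rsum - 9) (res ++ ['9'])
    else if 0 < rsum ∧ rsum < 9 then pvLoopA n (rsum - rsum) (res ++ PySem.Int.toChars rsum)
    else pvLoopA n rsum (res ++ ['0'])

def maxSumOfSquares (num : Int) (sum : Int) : String :=
  if sum > 9 * num then String.ofList []
  else String.ofList (pvLoopA num.toNat sum [])

-- ===== PORT B =====
def maxSumOfSquares_alt (num : Int) (sum : Int) : String :=
  if sum > 9 * num then String.ofList []
  else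
    let s := max sum 0
    let q := PySem.Int.floordiv s 9
    let r := PySem.Int.mod s 9
    String.ofList (List.replicate q.toNat '9'
      ++ (if r ≠ 0 then PySem.Int.toChars r else [])
      ++ List.replicate (num - q - (if r ≠ 0 then 1 else 0)).toNat '0')

-- ===== PRECONDITION & SPEC =====
def Spec_maxSumOfSquares (num : Int) (sum : Int) (out : String) : Prop := out = maxSumOfSquares_alt num sum
instance (num : Int) (sum : Int) (out : String) : Decidable (Spec_maxSumOfSquares num sum out) := by unfold Spec_maxSumOfSquares; infer_instance

-- ===== CLAIM (what is proved, stated in full; the proofs are below) =====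
def Claim_equal_maxSumOfSquares : Prop := ∀ (num : Int) (sum : Int), Dom_maxSumOfSquares num sum → Spec_maxSumOfSquares num sum (maxSumOfSquares num sum)

-- ===== LEMMAS AND PROOFS =====

-- With a non-positive remaining sum the loop appends only zeros.
theorem pvLoopA_nonpos (n : Nat) : ∀ (rsum : Int) (acc : List Char), rsum ≤ 0 →
    pvLoopA n rsum acc = acc ++ List.replicate n '0' := by
  induction n with
  | zero => intro rsum acc h; simp [pvLoopA]
  | succ n ih =>
    intro rsum acc h
    rw [pvLoopA]
    rw [if_neg (by omega), if_neg (by omega)]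
    rw [ih rsum (acc ++ ['0']) h]
    simp [List.replicate_succ]

-- Closed form of the loop for a positive remaining sum that fits in n digits.
theorem pvLoopA_pos (n : Nat) : ∀ (rsum : Int) (acc : List Char), 0 < rsum → rsum ≤ 9 * n →
    pvLoopA n rsum acc = acc ++ List.replicate (rsum / 9).toNat '9'
      ++ (if rsum % 9 ≠ 0 then PySem.Int.toChars (rsum % 9) else [])
      ++ List.replicate (n - (rsum / 9).toNat - (if rsum % 9 ≠ 0 then 1 else 0)) '0' := by
  induction n with
  | zero => intro rsum acc h1 h2; omega
  | succ n ih =>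
    intro rsum acc h1 h2
    rw [pvLoopA]
    by_cases h9 : rsum ≥ 9
    · rw [if_pos h9]
      by_cases hz : rsum - 9 ≤ 0
      · -- rsum = 9 exactly
        have hr9 : rsum = 9 := by omega
        rw [pvLoopA_nonpos n (rsum - 9) _ hz]
        subst hr9
        simp [List.replicate_succ]
      · rw [ih (rsum - 9) (acc ++ ['9']) (by omega) (by omega)]
        have hd : ((rsum - 9) / 9) = rsum / 9 - 1 := by omega
        have hm : ((rsum - 9) % 9) = rsum % 9 := by omega
        have hq1 : 1 ≤ rsum / 9 := by omega
        rw [hd, hm]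
        have : (rsum / 9).toNat = ((rsum / 9 - 1).toNat) + 1 := by omega
        rw [this]
        simp only [List.replicate_succ, List.append_assoc, List.cons_append, List.nil_append]
        have hsub : n + 1 - ((rsum / 9 - 1).toNat + 1) = n - (rsum / 9 - 1).toNat := by omega
        rw [hsub]
    · rw [if_neg h9, if_pos ⟨h1, by omega⟩]
      rw [pvLoopA_nonpos n (rsum - rsum) _ (by omega)]
      have hd : rsum / 9 = 0 := by omega
      have hm : rsum % 9 = rsum := by omega
      rw [hd, hm, if_pos (by omega : rsum ≠ 0)]
      simp only [Int.toNat_zero, List.replicate_zero, List.append_nil,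
        List.append_assoc, Nat.sub_zero]
      congr 2
      rw [if_pos (by omega : rsum ≠ 0)]
      simp

-- ===== VERDICT (by name: the statement is the Claim_ definition above) =====
theorem maxSumOfSquares_spec : Claim_equal_maxSumOfSquares := by
  intro num sum _
  unfold Spec_maxSumOfSquares maxSumOfSquares maxSumOfSquares_alt
  by_cases hgt : sum > 9 * num
  · rw [if_pos hgt, if_pos hgt]
  · rw [if_neg hgt, if_neg hgt]
    dsimp only
    by_cases hpos : 0 < sum
    · have hnum : 0 < num := by nlinarith
      have hle : sum ≤ 9 * num.toNat := by omega
      rw [pvLoopA_pos num.toNat sum [] hpos hle]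
      have hmax : max sum 0 = sum := by omega
      have hfd : PySem.Int.floordiv sum 9 = sum / 9 :=
        PySem.Int.floordiv_eq_ediv_of_pos (by omega)
      have hmd : PySem.Int.mod sum 9 = sum % 9 :=
        PySem.Int.mod_eq_emod_of_pos (by omega)
      simp only [hmax, hfd, hmd, List.nil_append]
      by_cases hr : sum % 9 = 0
      · rw [if_neg (fun h => h hr), if_neg (fun h => h hr), if_neg (fun h => h hr),
          show num.toNat - (sum / 9).toNat - 0 = (num - sum / 9 - 0).toNat from by omega]
      · rw [if_pos hr, if_pos hr, if_pos hr,
          show num.toNat - (sum / 9).toNat - 1 = (num - sum / 9 - 1).toNat from by omega]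
    · rw [pvLoopA_nonpos num.toNat sum [] (by omega)]
      have hmax : max sum 0 = 0 := by omega
      rw [hmax]
      have hfd : PySem.Int.floordiv 0 9 = 0 := by decide
      have hmd : PySem.Int.mod 0 9 = 0 := by decide
      rw [hfd, hmd]
      simp
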